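-- pv_equiv track=rewrite | github.com/hydrogendeuteride/DataMining | pageranktest.py | graph_csr
-- ===== SOURCE A (Python) =====
-- from collections import defaultdict
--
-- def graph_csr(edge_list):
--     value = []
--     index = []
--     rowptr = [0]
--
--     graph = defaultdict(list)
--     all_nodes = set()
--
--     for src, dst in edge_list:
--         graph[src].append(dst)
--         all_nodes.add(src)
--         all_nodes.add(dst)
--
--     nodes = sorted(all_nodes)
--     node_to_index = {node: i for i, node in enumerate(nodes)}
--
--     n, m = max(nodes) + 1, max(nodes) + 1
--
--     for node in nodes:
--         for dst in graph[node]: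
--             value.append(1)
--             index.append(node_to_index[dst])
--         rowptr.append(len(value))
--
--     return value, index, rowptr, n, m
-- ===== SOURCE B (Python) =====
-- def graph_csr(edge_list):
--     all_nodes = set()
--     for src, dst in edge_list:
--         all_nodes.add(src)
--         all_nodes.add(dst)
--     nodes = sorted(all_nodes)
--     node_to_index = {node: i for i, node in enumerate(nodes)}
--     index = []
--     rowptr = [0]
--     for node in nodes:
--         index += [node_to_index[dst] for src, dst in edge_list if src == node]
--         rowptr.append(len(index))
--     value = [1] * len(index)
--     n = nodes[-1] + 1
--     return value, index, rowptr, n, n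
-- ===== Notes on version B (the rewrite author's own statement) =====
-- stated objective: simpler
-- what changed: B drops the defaultdict grouping entirely: it collects each CSR row by filtering the edge list per sorted node, builds value as [1]*len(index) at the end instead of pushing 1 per edge, and reads n from nodes[-1] instead of max(nodes).
-- outside the precondition, e.g. on graph_csr([]): A raises ValueError, B raises IndexError
import Mathlib
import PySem

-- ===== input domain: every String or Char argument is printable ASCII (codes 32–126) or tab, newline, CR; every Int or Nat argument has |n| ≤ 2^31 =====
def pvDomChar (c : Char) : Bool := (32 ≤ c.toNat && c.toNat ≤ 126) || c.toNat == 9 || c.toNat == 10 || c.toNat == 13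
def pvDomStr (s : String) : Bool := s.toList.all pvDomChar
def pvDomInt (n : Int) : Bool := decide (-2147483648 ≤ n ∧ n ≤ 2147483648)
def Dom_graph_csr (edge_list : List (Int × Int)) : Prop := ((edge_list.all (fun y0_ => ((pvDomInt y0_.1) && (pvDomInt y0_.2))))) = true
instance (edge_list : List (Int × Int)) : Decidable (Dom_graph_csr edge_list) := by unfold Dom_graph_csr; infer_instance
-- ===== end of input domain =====

-- B builds each CSR row by filtering the edge list per sorted node (no defaultdict), makes
-- value as [1]*len(index) at the end, and reads n from nodes[-1]; return values proved equal.

-- ===== PORT A =====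
-- graph[src].append(dst) on a defaultdict(list) = Dict.modify src [] (· ++ [dst]);
-- node_to_index[dst] ported as getD … 0: dst is always a key (dst ∈ all_nodes), so no KeyError arises.
def graph_csr (edge_list : List (Int × Int)) : List Int × List Int × List Int × Int × Int :=
  let st := edge_list.foldl
    (fun (st : PySem.Dict Int (List Int) × PySem.Set Int) p =>
      (st.1.modify p.1 [] (· ++ [p.2]), PySem.Set.add (PySem.Set.add st.2 p.1) p.2))
    (PySem.Dict.empty, PySem.Set.empty)
  let graph := st.1
  let nodes := PySem.List.sorted st.2 (fun x => x) false
  let node_to_index : PySem.Dict Int Int :=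
    (PySem.List.enumerate nodes).foldl (fun d q => d.insert q.2 q.1) PySem.Dict.empty
  -- max(nodes) raises ValueError on an empty list: excluded by Pre_graph_csr
  let n := (PySem.List.max? nodes (fun x => x)).getD 0 + 1
  let res := nodes.foldl
    (fun (acc : List Int × List Int × List Int) node =>
      let inner := (graph.getD node []).foldl
        (fun (vi : List Int × List Int) dst =>
          (vi.1 ++ [(1 : Int)], vi.2 ++ [node_to_index.getD dst 0]))
        (acc.1, acc.2.1)
      (inner.1, inner.2, acc.2.2 ++ [(inner.1.length : Int)]))
    ([], [], [(0 : Int)])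
  (res.1, res.2.1, res.2.2, n, n)

-- ===== PORT B =====
def graph_csr_alt (edge_list : List (Int × Int)) : List Int × List Int × List Int × Int × Int :=
  let all_nodes := edge_list.foldl
    (fun (s : PySem.Set Int) p => PySem.Set.add (PySem.Set.add s p.1) p.2) PySem.Set.empty
  let nodes := PySem.List.sorted all_nodes (fun x => x) false
  let node_to_index : PySem.Dict Int Int :=
    (PySem.List.enumerate nodes).foldl (fun d q => d.insert q.2 q.1) PySem.Dict.empty
  let ir := nodes.foldl
    (fun (acc : List Int × List Int) node =>
      let row := (edge_list.filter (fun p => p.1 == node)).map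
        (fun p => node_to_index.getD p.2 0)
      (acc.1 ++ row, acc.2 ++ [((acc.1 ++ row).length : Int)]))
    ([], [(0 : Int)])
  let value := List.replicate ir.1.length (1 : Int)
  -- nodes[-1] raises IndexError on an empty list: excluded by Pre_graph_csr
  let n := (PySem.List.pyGet? nodes (-1)).getD 0 + 1
  (value, ir.1, ir.2, n, n)

-- ===== PRECONDITION & SPEC =====
-- On edge_list = [] A raises ValueError (max of empty sequence), and B raises IndexError (nodes[-1]).
def Pre_graph_csr (edge_list : List (Int × Int)) : Prop := edge_list ≠ []
instance (edge_list : List (Int × Int)) : Decidable (Pre_graph_csr edge_list) := by unfold Pre_graph_csr; infer_instance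
def pvWitness_graph_csr : (List (Int × Int)) := [(0, 1), (1, 0), (1, 2)]

def Spec_graph_csr (edge_list : List (Int × Int)) (out : List Int × List Int × List Int × Int × Int) : Prop := out = graph_csr_alt edge_list
instance (edge_list : List (Int × Int)) (out : List Int × List Int × List Int × Int × Int) : Decidable (Spec_graph_csr edge_list out) := by unfold Spec_graph_csr; infer_instance

-- ===== CLAIM (what is proved, stated in full; the proofs are below) =====
def Claim_equal_graph_csr : Prop := ∀ (edge_list : List (Int × Int)), Dom_graph_csr edge_list → Pre_graph_csr edge_list → Spec_graph_csr edge_list (graph_csr edge_list)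

-- ===== LEMMAS AND PROOFS =====

-- Set.add keeps a nonempty set nonempty
lemma pv_add_ne_nil (s : PySem.Set Int) (x : Int) (hs : s ≠ []) : PySem.Set.add s x ≠ [] := by
  unfold PySem.Set.add; split <;> simp_all

-- the set-building fold keeps a nonempty set nonempty
lemma pv_foldl_add2_ne_nil (l : List (Int × Int)) (s : PySem.Set Int) (hs : s ≠ []) :
    l.foldl (fun (s : PySem.Set Int) p => PySem.Set.add (PySem.Set.add s p.1) p.2) s ≠ [] := by
  induction l generalizing s with
  | nil => exact hs
  | cons e t ih => exact ih _ (pv_add_ne_nil _ _ (pv_add_ne_nil _ _ hs))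

-- for a nonempty edge list, nodes is nonempty
lemma pv_nodes_ne_nil (edge_list : List (Int × Int)) (h : edge_list ≠ []) :
    PySem.List.sorted
      (edge_list.foldl (fun (s : PySem.Set Int) p => PySem.Set.add (PySem.Set.add s p.1) p.2)
        PySem.Set.empty) (fun x => x) false ≠ [] := by
  intro hns
  rw [PySem.List.sorted_eq_nil_iff] at hns
  cases edge_list with
  | nil => exact h rfl
  | cons e t =>
      refine pv_foldl_add2_ne_nil t (PySem.Set.add (PySem.Set.add PySem.Set.empty e.1) e.2) ?_ hns
      have h1 : PySem.Set.add PySem.Set.empty e.1 = [e.1] := rfl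
      exact pv_add_ne_nil _ _ (h1 ▸ List.cons_ne_nil _ _)

-- on a ≤-sorted nonempty Int list, max(l) (first extremal) equals l[-1]
lemma pv_max_eq_last (l : List Int) (hp : l.Pairwise (· ≤ ·)) (h : l ≠ []) :
    (PySem.List.max? l (fun x => x)).getD 0 = (PySem.List.pyGet? l (-1)).getD 0 := by
  obtain ⟨m, hm⟩ : ∃ m, PySem.List.max? l (fun x => x) = some m := by
    cases hml : PySem.List.max? l (fun x => x) with
    | none => exact absurd ((PySem.List.max?_eq_none_iff l (fun x => x)).mp hml) h
    | some m => exact ⟨m, rfl⟩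
  have hlen : 0 < l.length := List.length_pos_iff.mpr h
  have hget : PySem.List.pyGet? l (-1) = some (l[l.length - 1]'(by omega)) := by
    simp only [PySem.List.pyGet?, PySem.List.pyIdx?]
    norm_num
    rw [if_pos (by omega)]
    simp [List.getElem?_eq_getElem (show l.length - 1 < l.length by omega)]
  rw [hm, hget]
  have hlast_mem : l[l.length - 1] ∈ l := List.getElem_mem _
  have h1 : l[l.length - 1] ≤ m := PySem.List.max?_isMax hm _ hlast_mem
  have h2 : m ≤ l[l.length - 1] := by
    obtain ⟨i, hi, hmi⟩ := List.mem_iff_getElem.mp (PySem.List.max?_mem hm)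
    rcases Nat.lt_or_ge i (l.length - 1) with h' | h'
    · subst hmi
      exact List.pairwise_iff_getElem.mp hp i (l.length - 1) (by omega) (by omega) h'
    · have hieq : i = l.length - 1 := by omega
      subst hieq
      exact le_of_eq hmi.symm
  simp [le_antisymm h2 h1]

-- grouping by a defaultdict(list) reads back as a filter of the edge list
lemma pv_row_eq (edge_list : List (Int × Int)) (node : Int) :
    (edge_list.foldl (fun (d : PySem.Dict Int (List Int)) p => d.modify p.1 [] (· ++ [p.2]))
        PySem.Dict.empty).getD node []
      = (edge_list.filter (fun p => p.1 == node)).map (·.2) := by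
  rw [PySem.Dict.getD_foldl_modify_append]
  simp

-- A's grouped emit loop and B's filter-per-row loop build the same index/rowptr,
-- and A's value list is a replicate of the index length
lemma pv_loop (edge_list : List (Int × Int)) (nti : PySem.Dict Int Int) :
    ∀ (ns i r : List Int),
    ns.foldl
      (fun (acc : List Int × List Int × List Int) node =>
        let inner := ((edge_list.foldl (fun (d : PySem.Dict Int (List Int)) p => d.modify p.1 [] (· ++ [p.2])) PySem.Dict.empty).getD node []).foldl
          (fun (vi : List Int × List Int) dst => (vi.1 ++ [(1:Int)], vi.2 ++ [nti.getD dst 0])) (acc.1, acc.2.1)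
        (inner.1, inner.2, acc.2.2 ++ [(inner.1.length : Int)]))
      (List.replicate i.length (1:Int), i, r)
    = ((List.replicate (ns.foldl
          (fun (acc : List Int × List Int) node =>
            let row := (edge_list.filter (fun p => p.1 == node)).map (fun p => nti.getD p.2 0)
            (acc.1 ++ row, acc.2 ++ [((acc.1 ++ row).length : Int)])) (i, r)).1.length (1:Int)),
       (ns.foldl
          (fun (acc : List Int × List Int) node =>
            let row := (edge_list.filter (fun p => p.1 == node)).map (fun p => nti.getD p.2 0)
            (acc.1 ++ row, acc.2 ++ [((acc.1 ++ row).length : Int)])) (i, r)).1,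
       (ns.foldl
          (fun (acc : List Int × List Int) node =>
            let row := (edge_list.filter (fun p => p.1 == node)).map (fun p => nti.getD p.2 0)
            (acc.1 ++ row, acc.2 ++ [((acc.1 ++ row).length : Int)])) (i, r)).2) := by
  intro ns
  induction ns with
  | nil => intro i r; rfl
  | cons node t ih =>
    intro i r
    simp only [List.foldl_cons]
    rw [PySem.List.foldl_prod_mk (f := fun acc (_ : Int) => acc ++ [(1:Int)])
        (g := fun acc dst => acc ++ [nti.getD dst 0])]
    rw [PySem.List.foldl_append_singleton_eq_map, PySem.List.foldl_append_singleton_eq_map]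
    rw [pv_row_eq]
    have hval : List.replicate i.length (1:Int)
          ++ ((edge_list.filter (fun p => p.1 == node)).map (·.2)).map (fun _ => (1:Int))
        = List.replicate (i ++ (edge_list.filter (fun p => p.1 == node)).map (fun p => nti.getD p.2 0)).length (1:Int) := by
      simp [Function.comp_def, List.map_const', List.length_append, List.replicate_append_replicate]
    have hidx : i ++ ((edge_list.filter (fun p => p.1 == node)).map (·.2)).map (fun dst => nti.getD dst 0)
        = i ++ (edge_list.filter (fun p => p.1 == node)).map (fun p => nti.getD p.2 0) := by
      simp [List.map_map, Function.comp]
    rw [hval, hidx]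
    have hlen : (List.replicate (i ++ (edge_list.filter (fun p => p.1 == node)).map (fun p => nti.getD p.2 0)).length (1:Int)).length
        = (i ++ (edge_list.filter (fun p => p.1 == node)).map (fun p => nti.getD p.2 0)).length := List.length_replicate
    rw [hlen]
    exact ih _ _

-- ===== VERDICT (by name: the statement is the Claim_ definition above) =====
theorem graph_csr_spec : Claim_equal_graph_csr := by
  intro edge_list _ hpre
  unfold Spec_graph_csr graph_csr graph_csr_alt
  rw [PySem.List.foldl_prod_mk
      (f := fun (d : PySem.Dict Int (List Int)) (p : Int × Int) => d.modify p.1 [] (· ++ [p.2]))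
      (g := fun (s : PySem.Set Int) (p : Int × Int) => PySem.Set.add (PySem.Set.add s p.1) p.2)]
  have hn := pv_max_eq_last
      (PySem.List.sorted
        (edge_list.foldl (fun (s : PySem.Set Int) p => PySem.Set.add (PySem.Set.add s p.1) p.2)
          PySem.Set.empty) (fun x => x) false)
      (PySem.List.sorted_pairwise _ _)
      (pv_nodes_ne_nil edge_list hpre)
  have hloop := pv_loop edge_list
    ((PySem.List.enumerate
        (PySem.List.sorted
          (edge_list.foldl (fun (s : PySem.Set Int) p => PySem.Set.add (PySem.Set.add s p.1) p.2)
            PySem.Set.empty) (fun x => x) false)).foldl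
      (fun (d : PySem.Dict Int Int) q => d.insert q.2 q.1) PySem.Dict.empty)
    (PySem.List.sorted
      (edge_list.foldl (fun (s : PySem.Set Int) p => PySem.Set.add (PySem.Set.add s p.1) p.2)
        PySem.Set.empty) (fun x => x) false)
    [] [(0 : Int)]
  simp only [List.length_nil, List.replicate_zero] at hloop
  simp only []
  rw [hloop, hn]
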